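-- pv_equiv track=rewrite | github.com/ilir-b17/AI-Prototype | src/skills/run_terminal_command/__init__.py | _contains_shell_metacharacters_outside_quotes
-- ===== SOURCE A (Python) =====
-- SHELL_METACHARACTERS = set(";&|<>`$")
--
-- def _contains_shell_metacharacters_outside_quotes(command: str) -> bool:
--     in_single_quote = False
--     in_double_quote = False
--     escaped = False
--
--     for char in command:
--         if escaped:
--             escaped = False
--             continue
--
--         if char == "\\" and not in_single_quote:
--             escaped = True
--             continue
--         if char == "'" and not in_double_quote:
--             in_single_quote = not in_single_quote
--             continue
--         if char == '"' and not in_single_quote: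
--             in_double_quote = not in_double_quote
--             continue
--         if not in_single_quote and not in_double_quote and char in SHELL_METACHARACTERS:
--             return True
--     return False
-- ===== SOURCE B (Python) =====
-- SHELL_METACHARACTERS = set(";&|<>`$")
--
--
-- def _contains_shell_metacharacters_outside_quotes(command: str) -> bool:
--     i, n = 0, len(command)
--     while i < n:
--         c = command[i]
--         if c == "\\":
--             i += 2
--         elif c == "'":
--             i += 1
--             while i < n and command[i] != "'":
--                 i += 1
--             i += 1
--         elif c == '"':
--             i += 1
--             while i < n:
--                 if command[i] == "\\":
--                     i += 2
--                 elif command[i] == '"':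
--                     break
--                 else:
--                     i += 1
--             i += 1
--         elif c in SHELL_METACHARACTERS:
--             return True
--         else:
--             i += 1
--     return False
-- ===== Notes on version B (the rewrite author's own statement) =====
-- stated objective: alternative
-- what changed: Replaces A's single pass with three persistent state flags (in_single_quote/in_double_quote/escaped) by an index-driven scan whose quote spans and escapes are consumed by dedicated inner loops, so no cross-iteration state flags exist.
import Mathlib
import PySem

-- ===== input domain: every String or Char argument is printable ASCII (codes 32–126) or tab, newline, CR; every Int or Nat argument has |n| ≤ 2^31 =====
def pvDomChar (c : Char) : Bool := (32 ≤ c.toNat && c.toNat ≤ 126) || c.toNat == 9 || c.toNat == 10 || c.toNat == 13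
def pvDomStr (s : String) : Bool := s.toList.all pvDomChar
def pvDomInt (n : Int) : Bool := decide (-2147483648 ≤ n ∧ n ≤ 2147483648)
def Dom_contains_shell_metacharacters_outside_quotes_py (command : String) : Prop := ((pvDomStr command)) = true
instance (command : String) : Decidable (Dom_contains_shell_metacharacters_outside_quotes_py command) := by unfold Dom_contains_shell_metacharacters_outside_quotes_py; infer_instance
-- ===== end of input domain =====

-- B replaces A's three-flag state machine by an index-driven scan whose quote spans are consumed by dedicated inner loops (objective: alternative decomposition, same cost).

-- ===== PORT A =====
def pvMetas : List Char := [';', '&', '|', '<', '>', '`', '$']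

-- A's for-loop over the characters with its three state flags
def pvALoop : List Char → Bool → Bool → Bool → Bool
  | [], _, _, _ => false
  | c :: rest, insq, indq, esc =>
    if esc then pvALoop rest insq indq false
    else if c = '\\' ∧ ¬ insq then pvALoop rest insq indq true
    else if c = '\'' ∧ ¬ indq then pvALoop rest (!insq) indq esc
    else if c = '"' ∧ ¬ insq then pvALoop rest insq (!indq) esc
    else if ¬ insq ∧ ¬ indq ∧ c ∈ pvMetas then true
    else pvALoop rest insq indq esc

def contains_shell_metacharacters_outside_quotes_py (command : String) : Bool :=
  pvALoop command.toList false false false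

-- ===== PORT B =====
-- B's inner single-quote while loop: advance to the matching single quote and past it
def pvBSingle : List Char → List Char
  | [] => []
  | c :: rest => if c = '\'' then rest else pvBSingle rest

-- B's inner double-quote while loop: advance to the matching double quote (skipping a char after each backslash) and past it
def pvBDouble : List Char → List Char
  | [] => []
  | [_] => []
  | c :: d :: rest =>
    if c = '\\' then pvBDouble rest
    else if c = '"' then d :: rest
    else pvBDouble (d :: rest)

-- B's driver while loop over positions; fuel any number > length of the list (each step drops at least one char)
def pvBMainF : Nat → List Char → Bool
  | 0, _ => false
  | _ + 1, [] => false
  | f + 1, c :: rest =>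
    if c = '\\' then pvBMainF f (rest.drop 1)
    else if c = '\'' then pvBMainF f (pvBSingle rest)
    else if c = '"' then pvBMainF f (pvBDouble rest)
    else if c ∈ pvMetas then true
    else pvBMainF f rest

def contains_shell_metacharacters_outside_quotes_py_alt (command : String) : Bool :=
  pvBMainF (command.toList.length + 1) command.toList

-- ===== PRECONDITION & SPEC =====
def Spec_contains_shell_metacharacters_outside_quotes_py (command : String) (out : Bool) : Prop := out = contains_shell_metacharacters_outside_quotes_py_alt command
instance (command : String) (out : Bool) : Decidable (Spec_contains_shell_metacharacters_outside_quotes_py command out) := by unfold Spec_contains_shell_metacharacters_outside_quotes_py; infer_instance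

-- ===== CLAIM (what is proved, stated in full; the proofs are below) =====
def Claim_equal_contains_shell_metacharacters_outside_quotes_py : Prop := ∀ (command : String), Dom_contains_shell_metacharacters_outside_quotes_py command → Spec_contains_shell_metacharacters_outside_quotes_py command (contains_shell_metacharacters_outside_quotes_py command)

-- ===== LEMMAS AND PROOFS =====

theorem pvBMainF_nil : ∀ (f : Nat), pvBMainF f [] = false := by
  intro f; cases f <;> simp [pvBMainF]

-- the three reachable escape-free states of A correspond to B's driver and its two inner loops
theorem pvKey : ∀ (n : Nat) (l : List Char) (f : Nat), l.length ≤ n → l.length < f →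
    (pvALoop l false false false = pvBMainF f l) ∧
    (pvALoop l true false false = pvBMainF f (pvBSingle l)) ∧
    (pvALoop l false true false = pvBMainF f (pvBDouble l)) := by
  intro n
  induction n with
  | zero =>
    intro l f hl hf
    have : l = [] := List.eq_nil_of_length_eq_zero (by omega)
    subst this
    simp [pvALoop, pvBSingle, pvBDouble, pvBMainF_nil]
  | succ n ih =>
    intro l f hl hf
    cases l with
    | nil => simp [pvALoop, pvBSingle, pvBDouble, pvBMainF_nil]
    | cons c rest =>
      simp only [List.length_cons] at hl hf
      have hrest : rest.length ≤ n := by omega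
      refine ⟨?_, ?_, ?_⟩
      · -- top level (B's driver loop; unfolds one fuel step)
        obtain ⟨f', rfl⟩ : ∃ f', f = f' + 1 := ⟨f - 1, by omega⟩
        have hf' : rest.length < f' := by omega
        by_cases h1 : c = '\\'
        · subst h1
          cases rest with
          | nil => simp [pvALoop, pvBMainF, pvBMainF_nil]
          | cons d r =>
            have hr : r.length ≤ n := by simp at hrest; omega
            simpa [pvALoop, pvBMainF] using (ih r f' hr (by simp at hf'; omega)).1
        · by_cases h2 : c = '\''
          · subst h2
            simpa [pvALoop, pvBMainF] using (ih rest f' hrest hf').2.1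
          · by_cases h3 : c = '"'
            · subst h3
              simpa [pvALoop, pvBMainF] using (ih rest f' hrest hf').2.2
            · by_cases h4 : c ∈ pvMetas
              · simp [pvALoop, pvBMainF, h1, h2, h3, h4]
              · simpa [pvALoop, pvBMainF, h1, h2, h3, h4] using (ih rest f' hrest hf').1
      · -- inside single quotes (B's single-quote span loop)
        have hf2 : rest.length < f := by omega
        by_cases h2 : c = '\''
        · subst h2
          simpa [pvALoop, pvBSingle] using (ih rest f hrest hf2).1
        · simpa [pvALoop, pvBSingle, h2] using (ih rest f hrest hf2).2.1
      · -- inside double quotes (B's double-quote span loop)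
        have hf2 : rest.length < f := by omega
        by_cases h1 : c = '\\'
        · subst h1
          cases rest with
          | nil => simp [pvALoop, pvBDouble, pvBMainF_nil]
          | cons d r =>
            have hr : r.length ≤ n := by simp at hrest; omega
            simpa [pvALoop, pvBDouble] using (ih r f hr (by simp at hf2; omega)).2.2
        · by_cases h3 : c = '"'
          · subst h3
            cases rest with
            | nil => simp [pvALoop, pvBDouble, pvBMainF_nil]
            | cons d r =>
              simpa [pvALoop, pvBDouble] using (ih (d :: r) f hrest hf2).1
          · cases rest with
            | nil => simp [pvALoop, pvBDouble, pvBMainF_nil, h1, h3]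
            | cons d r =>
              simpa [pvALoop, pvBDouble, h1, h3] using (ih (d :: r) f hrest hf2).2.2

-- ===== VERDICT (by name: the statement is the Claim_ definition above) =====
theorem contains_shell_metacharacters_outside_quotes_py_spec : Claim_equal_contains_shell_metacharacters_outside_quotes_py := by
  intro command _
  unfold Spec_contains_shell_metacharacters_outside_quotes_py
  unfold contains_shell_metacharacters_outside_quotes_py contains_shell_metacharacters_outside_quotes_py_alt
  exact (pvKey command.toList.length command.toList (command.toList.length + 1) le_rfl (by omega)).1
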